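-- pv_equiv track=rewrite | github.com/florianfmmartin/kb-layout-evaluation | layout_evaluation/script.py | make_swap_layouts
-- ===== SOURCE A (Python) =====
-- def make_swap_layouts(base_name, base_layout):
--     """
--     Makes all possile one swap layout from base_layout.
--     """
--     # symbols to swap
--     symbols_to_swap = ["q", "w", "e", "r", "t", "y", "u", "i", "o", "p",
--                        "a", "s", "d", "f", "g", "h", "j", "k", "l", "z",
--                        "x", "c", "v", "b", "n", "m", ",", ".", "'", "é"]
--
--     # base_layout extraction
--     base_layout = base_layout.split("\n")
--     base_layout = base_layout[1] + "\n" + base_layout[2] + "\n" + base_layout[3]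
--
--     all_layouts = ""
--     combination_tried = []
--
--     # loop through possibility
--     for symbol_from in symbols_to_swap:
--         for symbol_to in symbols_to_swap:
--             # checks if same symbol or already swapped
--             same_symbol = symbol_from == symbol_to
--             tried = (symbol_from, symbol_to) in combination_tried or (symbol_to, symbol_from) in combination_tried
--
--             if not same_symbol and not tried:
--                 # adds name
--                 swap_name = f">>{base_name}, ({symbol_from}, {symbol_to})\n"
--                 # adds layout
--                 swap_layout = ""
--                 for symbol_original in base_layout:
--                     if symbol_original == symbol_from:
--                         swap_layout += symbol_to
--                     elif symbol_original == symbol_to: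
--                         swap_layout += symbol_from
--                     else:
--                         swap_layout += symbol_original
--
--                 all_layouts += swap_name + swap_layout + "\n\n\n"
--                 combination_tried.append((symbol_from, symbol_to))
--
--     # return all layouts found
--     return all_layouts
-- ===== SOURCE B (Python) =====
-- def make_swap_layouts(base_name, base_layout):
--     """
--     Makes all possible one-swap layouts from base_layout.
--     """
--     symbols = ["q", "w", "e", "r", "t", "y", "u", "i", "o", "p",
--                "a", "s", "d", "f", "g", "h", "j", "k", "l", "z",
--                "x", "c", "v", "b", "n", "m", ",", ".", "'", "é"]
--
--     lines = base_layout.split("\n")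
--     layout = lines[1] + "\n" + lines[2] + "\n" + lines[3]
--
--     parts = []
--     for i in range(len(symbols)):
--         a = symbols[i]
--         for j in range(i + 1, len(symbols)):
--             b = symbols[j]
--             swapped = "".join(b if c == a else a if c == b else c for c in layout)
--             parts.append(f">>{base_name}, ({a}, {b})\n{swapped}\n\n\n")
--     return "".join(parts)
-- ===== Notes on version B (the rewrite author's own statement) =====
-- stated objective: simpler
-- what changed: Replaces the full double loop over symbols with a seen-pairs list and membership tests by index loops i<j that enumerate each unordered pair exactly once, dropping the combination_tried bookkeeping; output strings are collected in a list and joined instead of repeated concatenation.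
import Mathlib
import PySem

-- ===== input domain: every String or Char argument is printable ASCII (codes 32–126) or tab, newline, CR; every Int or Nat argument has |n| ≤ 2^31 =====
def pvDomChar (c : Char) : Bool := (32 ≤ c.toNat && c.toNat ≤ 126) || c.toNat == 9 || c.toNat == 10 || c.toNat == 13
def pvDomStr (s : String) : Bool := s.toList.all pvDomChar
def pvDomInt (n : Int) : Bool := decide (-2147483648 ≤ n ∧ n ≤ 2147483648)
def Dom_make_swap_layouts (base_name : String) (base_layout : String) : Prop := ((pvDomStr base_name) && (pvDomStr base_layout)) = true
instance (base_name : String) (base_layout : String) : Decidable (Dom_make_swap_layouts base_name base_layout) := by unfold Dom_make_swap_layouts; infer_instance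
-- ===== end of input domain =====

-- B replaces A's double loop over symbols with a seen-pairs list by index loops i<j
-- that enumerate each unordered pair once (objective: simpler; return value only).


-- ===== PORT A =====
-- the `symbols_to_swap` constant of A
def symbolsA : List Char :=
  ['q','w','e','r','t','y','u','i','o','p','a','s','d','f','g','h','j','k','l','z',
   'x','c','v','b','n','m',',','.','\'','é']

-- body of A's inner `for symbol_to in symbols_to_swap` loop; state = (all_layouts, combination_tried)
def innerStepA (base_name : String) (base_layout : String) (symbol_from : Char)
    (st : String × List (Char × Char)) (symbol_to : Char) : String × List (Char × Char) :=
  let same_symbol := symbol_from == symbol_to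
  let tried := st.2.contains (symbol_from, symbol_to) || st.2.contains (symbol_to, symbol_from)
  if !same_symbol && !tried then
    let swap_name := ">>" ++ base_name ++ ", (" ++ symbol_from.toString ++ ", " ++ symbol_to.toString ++ ")\n"
    let swap_layout := base_layout.toList.foldl (fun s c =>
      s ++ (if c == symbol_from then symbol_to.toString
            else if c == symbol_to then symbol_from.toString
            else c.toString)) ""
    (st.1 ++ (swap_name ++ swap_layout ++ "\n\n\n"), st.2 ++ [(symbol_from, symbol_to)])
  else st

def make_swap_layouts (base_name : String) (base_layout : String) : String :=
  let symbols_to_swap := symbolsA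
  let lines := (PySem.Str.split? base_layout "\n").getD []
  let base_layout2 := (PySem.List.pyGet? lines 1).getD "" ++ "\n"
      ++ (PySem.List.pyGet? lines 2).getD "" ++ "\n" ++ (PySem.List.pyGet? lines 3).getD ""
  (symbols_to_swap.foldl (fun st symbol_from =>
      symbols_to_swap.foldl (innerStepA base_name base_layout2 symbol_from) st)
    ("", ([] : List (Char × Char)))).1

-- ===== PORT B =====
-- the `symbols` constant of B
def symbolsB : List Char :=
  ['q','w','e','r','t','y','u','i','o','p','a','s','d','f','g','h','j','k','l','z',
   'x','c','v','b','n','m',',','.','\'','é']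

def make_swap_layouts_alt (base_name : String) (base_layout : String) : String :=
  let symbols := symbolsB
  let lines := (PySem.Str.split? base_layout "\n").getD []
  let layout := (PySem.List.pyGet? lines 1).getD "" ++ "\n"
      ++ (PySem.List.pyGet? lines 2).getD "" ++ "\n" ++ (PySem.List.pyGet? lines 3).getD ""
  let n : Int := (symbols.length : Int)
  let parts := (PySem.List.pyRange 0 n).foldl (fun (parts : List String) i =>
      let a := (PySem.List.pyGet? symbols i).getD ' '
      (PySem.List.pyRange (i + 1) n).foldl (fun parts j =>
        let b := (PySem.List.pyGet? symbols j).getD ' '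
        let swapped := PySem.Str.join "" (layout.toList.map (fun c =>
          if c == a then b.toString else if c == b then a.toString else c.toString))
        parts ++ [">>" ++ base_name ++ ", (" ++ a.toString ++ ", " ++ b.toString ++ ")\n"
                  ++ swapped ++ "\n\n\n"]) parts) []
  PySem.Str.join "" parts

-- ===== PRECONDITION & SPEC =====
-- Pre_ excludes exactly the inputs whose layout has fewer than 4 newline-separated
-- fields: there Python A (and Python B) raises IndexError on base_layout.split("\n")[1..3].
def Pre_make_swap_layouts (base_name : String) (base_layout : String) : Prop :=
  4 ≤ ((PySem.Str.split? base_layout "\n").getD []).length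
instance (base_name : String) (base_layout : String) : Decidable (Pre_make_swap_layouts base_name base_layout) := by
  unfold Pre_make_swap_layouts; infer_instance

def pvWitness_make_swap_layouts : String × String := ("name", "#\nqwe\nasd\nzx,")

def Spec_make_swap_layouts (base_name : String) (base_layout : String) (out : String) : Prop :=
  out = make_swap_layouts_alt base_name base_layout
instance (base_name : String) (base_layout : String) (out : String) : Decidable (Spec_make_swap_layouts base_name base_layout out) := by
  unfold Spec_make_swap_layouts; infer_instance

-- ===== CLAIM (what is proved, stated in full; the proofs are below) =====
def Claim_equal_make_swap_layouts : Prop := ∀ (base_name : String) (base_layout : String), Dom_make_swap_layouts base_name base_layout → Pre_make_swap_layouts base_name base_layout → Spec_make_swap_layouts base_name base_layout (make_swap_layouts base_name base_layout)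

-- ===== LEMMAS AND PROOFS =====

-- the swap of one character
def swapc (f t c : Char) : Char := if c == f then t else if c == t then f else c

-- one emitted block, as a character list
def entryL (bn lay : List Char) (p : Char × Char) : List Char :=
  ">>".toList ++ bn ++ ", (".toList ++ [p.1] ++ ", ".toList ++ [p.2] ++ ")\n".toList
    ++ lay.map (swapc p.1 p.2) ++ "\n\n\n".toList

-- A's update of combination_tried for one inner step
def stepT (f : Char) (tr : List (Char × Char)) (t : Char) : List (Char × Char) :=
  if !(f == t) && !(tr.contains (f, t) || tr.contains (t, f)) then tr ++ [(f, t)] else tr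

-- pairs A emits during one inner scan
def pairsOut (f : Char) : List Char → List (Char × Char) → List (Char × Char)
  | [], _ => []
  | t :: L, tr =>
    (if !(f == t) && !(tr.contains (f, t) || tr.contains (t, f)) then [(f, t)] else [])
      ++ pairsOut f L (stepT f tr t)

-- pairs A emits during the whole outer loop
def outPairs (syms : List Char) : List Char → List (Char × Char) → List (Char × Char)
  | [], _ => []
  | f :: L, tr => pairsOut f syms tr ++ outPairs syms L (syms.foldl (stepT f) tr)

-- the triangular enumeration of pairs (what B emits)
def tri : List Char → List (Char × Char)
  | [] => []
  | f :: L => L.map (fun t => (f, t)) ++ tri L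

-- ----- generic string facts -----

theorem join_nil_flatten (l : List (List Char)) : PySem.Chars.join [] l = l.flatten := by
  induction l with
  | nil => rfl
  | cons a l ih =>
    cases l with
    | nil => simp [PySem.Chars.join, List.intercalate]
    | cons b t =>
      simp only [PySem.Chars.join, List.intercalate, List.intersperse_cons₂,
        List.flatten_cons] at *
      simp [ih]

theorem toList_fold_append (h : Char → String) :
    ∀ (cs : List Char) (s : String),
      (cs.foldl (fun s c => s ++ h c) s).toList = s.toList ++ cs.flatMap (fun c => (h c).toList)
  | [], s => by simp
  | c :: cs, s => by
    simp [toList_fold_append h cs (s ++ h c)]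

-- ----- A reduces to a fold over outPairs -----

theorem innerA_spec (bn bl : String) (f : Char) :
    ∀ (M : List Char) (acc : String) (tr : List (Char × Char)),
      (M.foldl (innerStepA bn bl f) (acc, tr)).1.toList
          = acc.toList ++ (pairsOut f M tr).flatMap (entryL bn.toList bl.toList)
        ∧ (M.foldl (innerStepA bn bl f) (acc, tr)).2 = M.foldl (stepT f) tr
  | [], acc, tr => by simp [pairsOut]
  | t :: M, acc, tr => by
    by_cases hcond : (!(f == t) && !(tr.contains (f, t) || tr.contains (t, f))) = true
    · have h1 := innerA_spec bn bl f M
        (acc ++ ((">>" ++ bn ++ ", (" ++ f.toString ++ ", " ++ t.toString ++ ")\n")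
          ++ bl.toList.foldl (fun s c =>
              s ++ (if c == f then t.toString else if c == t then f.toString else c.toString)) ""
          ++ "\n\n\n")) (tr ++ [(f, t)])
      simp only [List.foldl_cons, pairsOut, stepT, innerStepA, hcond, if_pos, if_true,
        List.singleton_append] at h1 ⊢
      refine ⟨?_, h1.2⟩
      rw [h1.1]
      have hs : ∀ c : Char,
          ((if c = f then String.singleton t else if c = t then String.singleton f
            else String.singleton c)).toList = [swapc f t c] := by
        intro c; simp only [swapc]; split_ifs <;> simp_all
      simp [entryL, String.toList_append, toList_fold_append, List.flatMap_cons, hs]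
      exact List.map_eq_flatMap.symm
    · have h1 := innerA_spec bn bl f M acc tr
      simp only [List.foldl_cons, pairsOut, stepT, innerStepA, hcond, if_neg, if_false,
        List.nil_append] at h1 ⊢
      exact h1

theorem outerA_spec (bn bl : String) :
    ∀ (L : List Char) (acc : String) (tr : List (Char × Char)),
      ((L.foldl (fun st f => symbolsA.foldl (innerStepA bn bl f) st) (acc, tr)).1.toList
          = acc.toList ++ (outPairs symbolsA L tr).flatMap (entryL bn.toList bl.toList))
        ∧ ((L.foldl (fun st f => symbolsA.foldl (innerStepA bn bl f) st) (acc, tr)).2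
          = L.foldl (fun tr f => symbolsA.foldl (stepT f) tr) tr)
  | [], acc, tr => by simp [outPairs]
  | f :: L, acc, tr => by
    have hin := innerA_spec bn bl f symbolsA acc tr
    have hout := outerA_spec bn bl L (symbolsA.foldl (innerStepA bn bl f) (acc, tr)).1
      (symbolsA.foldl (innerStepA bn bl f) (acc, tr)).2
    simp only [List.foldl_cons, outPairs] at hout ⊢
    constructor
    · rw [hout.1, hin.1, hin.2]
      simp [List.flatMap_append]
    · rw [hout.2, hin.2]

-- ----- outPairs on a nodup list is the triangular enumeration -----

-- the unordered-pair coverage relation of combination_tried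
def Cov (tr : List (Char × Char)) (x y : Char) : Prop := (x, y) ∈ tr ∨ (y, x) ∈ tr

theorem foldl_stepT_eq (f : Char) :
    ∀ (M : List Char) (tr : List (Char × Char)),
      M.foldl (stepT f) tr = tr ++ pairsOut f M tr
  | [], tr => by simp [pairsOut]
  | t :: M, tr => by
    simp only [List.foldl_cons, pairsOut, foldl_stepT_eq f M]
    unfold stepT
    split <;> simp

theorem pairsOut_filter (f : Char) :
    ∀ (M : List Char) (tr : List (Char × Char)), M.Nodup →
      pairsOut f M tr
        = (M.filter (fun t => !(f == t) && !(tr.contains (f, t) || tr.contains (t, f)))).map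
            (fun t => (f, t))
  | [], tr, _ => by simp [pairsOut]
  | t :: M, tr, h => by
    have hnd := (List.nodup_cons.mp h)
    have ih := pairsOut_filter f M (stepT f tr t) hnd.2
    have hpred : ∀ u ∈ M,
        (!(f == u) && !((stepT f tr t).contains (f, u) || (stepT f tr t).contains (u, f)))
          = (!(f == u) && !(tr.contains (f, u) || tr.contains (u, f))) := by
      intro u hu
      have hut : u ≠ t := fun hh => hnd.1 (hh ▸ hu)
      by_cases huf : u = f
      · simp [huf]
      · unfold stepT
        split
        · simp [List.contains_append, hut, Ne.symm hut, huf, Ne.symm huf]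
        · rfl
    rw [List.filter_congr hpred] at ih
    simp only [pairsOut, List.filter_cons, ih]
    split <;> simp

theorem out_spec (syms : List Char) (hnd : syms.Nodup) :
    ∀ (L P : List Char) (tr : List (Char × Char)), syms = P ++ L →
      (∀ x y, Cov tr x y ↔ (x ≠ y ∧ x ∈ syms ∧ y ∈ syms ∧ (x ∈ P ∨ y ∈ P))) →
      outPairs syms L tr = tri L
  | [], P, tr, hPL, hc => by simp [outPairs, tri]
  | f :: L, P, tr, hPL, hc => by
    subst hPL
    have hnd' := hnd
    simp only [List.nodup_append, List.nodup_cons] at hnd'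
    obtain ⟨hndP, ⟨hfL, hndL⟩, hsep⟩ := hnd'
    have hfP : f ∉ P := fun hh => hsep f hh f (by simp) rfl
    have hdisj : ∀ {t : Char}, t ∈ L → t ∉ P := fun {t} htL htP => hsep t htP t (by simp [htL]) rfl
    have hfsyms : f ∈ P ++ f :: L := by simp
    -- the inner scan over the whole symbol list emits exactly the pairs (f, t), t ∈ L
    have hfilter : (P ++ f :: L).filter
        (fun t => !(f == t) && !(tr.contains (f, t) || tr.contains (t, f))) = L := by
      rw [List.filter_append, List.filter_cons]
      have hP : P.filter (fun t => !(f == t) && !(tr.contains (f, t) || tr.contains (t, f))) = [] := by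
        rw [List.filter_eq_nil_iff]
        intro t htP
        have htf : ¬ (t = f) := fun hh => hfP (hh ▸ htP)
        have : Cov tr f t := (hc f t).mpr
          ⟨fun hh => htf hh.symm, hfsyms, by simp [htP], Or.inr htP⟩
        simp only [Cov] at this
        rcases this with h1 | h1 <;> simp [List.elem_eq_true_of_mem h1, h1]
      have hL : L.filter (fun t => !(f == t) && !(tr.contains (f, t) || tr.contains (t, f))) = L := by
        rw [List.filter_eq_self]
        intro t htL
        have htf : ¬ (f = t) := fun hh => hfL (hh ▸ htL)
        have hnc : ¬ Cov tr f t := fun hcov => by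
          rcases (hc f t).mp hcov with ⟨_, _, _, hin | hin⟩
          · exact hfP hin
          · exact hdisj htL hin
        simp only [Cov] at hnc
        push_neg at hnc
        simp [htf, hnc.1, hnc.2]
      rw [hP, hL]
      simp
    have hpo : pairsOut f (P ++ f :: L) tr = L.map (fun t => (f, t)) := by
      rw [pairsOut_filter f _ tr hnd, hfilter]
    -- the invariant carries over to P ++ [f]
    have hc' : ∀ x y, Cov ((P ++ f :: L).foldl (stepT f) tr) x y ↔
        (x ≠ y ∧ x ∈ P ++ f :: L ∧ y ∈ P ++ f :: L ∧ (x ∈ P ++ [f] ∨ y ∈ P ++ [f])) := by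
      intro x y
      rw [foldl_stepT_eq, hpo]
      constructor
      · rintro (hm | hm) <;> rw [List.mem_append] at hm
        · rcases hm with hm | hm
          · rcases (hc x y).mp (Or.inl hm) with ⟨h1, h2, h3, h4⟩
            exact ⟨h1, h2, h3, by rcases h4 with h4 | h4 <;> simp [h4]⟩
          · simp only [List.mem_map] at hm
            obtain ⟨t, htL, hteq⟩ := hm
            cases hteq
            exact ⟨fun hh => hfL (hh ▸ htL), hfsyms, by simp [htL], by simp⟩
        · rcases hm with hm | hm
          · rcases (hc x y).mp (Or.inr hm) with ⟨h1, h2, h3, h4⟩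
            exact ⟨h1, h2, h3, by rcases h4 with h4 | h4 <;> simp [h4]⟩
          · simp only [List.mem_map] at hm
            obtain ⟨t, htL, hteq⟩ := hm
            cases hteq
            exact ⟨fun hh => hfL (hh.symm ▸ htL), by simp [htL], hfsyms, by simp⟩
      · rintro ⟨h1, h2, h3, h4⟩
        by_cases hP : x ∈ P ∨ y ∈ P
        · rcases (hc x y).mpr ⟨h1, h2, h3, hP⟩ with hm | hm
          · exact Or.inl (by simp [hm])
          · exact Or.inr (by simp [hm])
        · push_neg at hP
          have hxy : x = f ∨ y = f := by
            rcases h4 with h4 | h4 <;> simp only [List.mem_append, List.mem_singleton] at h4 <;>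
              tauto
          rcases hxy with rfl | rfl
          · have hyL : y ∈ L := by
              simp only [List.mem_append, List.mem_cons] at h3
              rcases h3 with h3 | h3 | h3
              · exact absurd h3 hP.2
              · exact absurd h3.symm h1
              · exact h3
            exact Or.inl (by simp only [List.mem_append, List.mem_map]; right; exact ⟨y, hyL, rfl⟩)
          · have hxL : x ∈ L := by
              simp only [List.mem_append, List.mem_cons] at h2
              rcases h2 with h2 | h2 | h2
              · exact absurd h2 hP.1
              · exact absurd h2 h1
              · exact h2
            exact Or.inr (by simp only [List.mem_append, List.mem_map]; right; exact ⟨x, hxL, rfl⟩)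
    have ih := out_spec (P ++ f :: L) hnd L (P ++ [f])
      ((P ++ f :: L).foldl (stepT f) tr) (by simp) hc'
    simp only [outPairs, hpo, ih, tri]

-- ----- B reduces to a fold over tri -----

theorem pyRange_nil (a b : Int) (h : b ≤ a) : PySem.List.pyRange a b = [] := by
  rw [PySem.List.pyRange_of_pos a b (by omega)]
  simp [show ¬ a < b by omega]

theorem getD_pyGet_nat (xs : List Char) (a : Nat) (d : Char) (ha : a < xs.length) :
    (PySem.List.pyGet? xs (a : Int)).getD d = xs[a] := by
  show PySem.List.pyGetD xs (a : Int) d = xs[a]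
  simp [PySem.List.pyGetD_natCast, List.getD_eq_getElem?_getD, ha]

theorem map_get_pyRange (xs : List Char) :
    ∀ (k a : Nat), k = xs.length - a →
      (PySem.List.pyRange (a : Int) (xs.length : Int)).map
          (fun j => (PySem.List.pyGet? xs j).getD ' ') = xs.drop a
  | 0, a, hk => by
    have ha : xs.length ≤ a := by omega
    rw [pyRange_nil _ _ (by exact_mod_cast ha), List.drop_eq_nil_of_le ha]
    rfl
  | (k + 1), a, hk => by
    have ha : a < xs.length := by omega
    rw [PySem.List.pyRange_one_cons (by exact_mod_cast ha), List.map_cons,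
      getD_pyGet_nat xs a ' ' ha,
      show ((a : Int) + 1) = ((a + 1 : Nat) : Int) by push_cast; ring,
      map_get_pyRange xs k (a + 1) (by omega), List.drop_eq_getElem_cons ha]

theorem tri_eq_ranges (xs : List Char) :
    ∀ (k a : Nat), k = xs.length - a →
      (PySem.List.pyRange (a : Int) (xs.length : Int)).flatMap (fun i =>
          (PySem.List.pyRange (i + 1) (xs.length : Int)).map (fun j =>
            ((PySem.List.pyGet? xs i).getD ' ', (PySem.List.pyGet? xs j).getD ' ')))
        = tri (xs.drop a)
  | 0, a, hk => by
    have ha : xs.length ≤ a := by omega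
    rw [pyRange_nil _ _ (by exact_mod_cast ha), List.drop_eq_nil_of_le ha]
    rfl
  | (k + 1), a, hk => by
    have ha : a < xs.length := by omega
    rw [PySem.List.pyRange_one_cons (by exact_mod_cast ha), List.flatMap_cons,
      show ((a : Int) + 1) = ((a + 1 : Nat) : Int) by push_cast; ring,
      tri_eq_ranges xs k (a + 1) (by omega),
      List.drop_eq_getElem_cons ha]
    show _ ++ _ = tri (_ :: _)
    rw [tri, getD_pyGet_nat xs a ' ' ha,
      ← map_get_pyRange xs (k) (a + 1) (by omega), List.map_map]
    rfl

-- ===== VERDICT (by name: the statement is the Claim_ definition above) =====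
theorem symbolsA_nodup : symbolsA.Nodup := by decide

theorem pairsA_eq_tri : outPairs symbolsA symbolsA [] = tri symbolsA := by
  refine out_spec symbolsA symbolsA_nodup symbolsA [] [] rfl ?_
  intro x y
  simp [Cov]

theorem entryStrB_toList (bn : String) (lay : String) (a b : Char) :
    (">>" ++ bn ++ ", (" ++ a.toString ++ ", " ++ b.toString ++ ")\n"
      ++ PySem.Str.join "" (lay.toList.map (fun c =>
           if c == a then b.toString else if c == b then a.toString else c.toString))
      ++ "\n\n\n").toList = entryL bn.toList lay.toList (a, b) := by
  have hs : ∀ c : Char,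
      ((if c = a then String.singleton b else if c = b then String.singleton a
        else String.singleton c)).toList = [swapc a b c] := by
    intro c; simp only [swapc]; split_ifs <;> simp_all
  simp [entryL, String.toList_append, PySem.Str.toList_join, join_nil_flatten,
    List.map_map, Function.comp_def, hs]
  rw [← List.flatMap_def]
  exact List.map_eq_flatMap.symm

theorem foldl_parts (g : Int → Int → String) (n : Int) :
    (PySem.List.pyRange 0 n).foldl (fun (parts : List String) i =>
        (PySem.List.pyRange (i + 1) n).foldl (fun parts j => parts ++ [g i j]) parts) []
      = (PySem.List.pyRange 0 n).flatMap (fun i => (PySem.List.pyRange (i + 1) n).map (g i)) := by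
  rw [show (fun (parts : List String) (i : Int) =>
        (PySem.List.pyRange (i + 1) n).foldl (fun parts j => parts ++ [g i j]) parts)
      = fun (parts : List String) (i : Int) =>
        parts ++ (PySem.List.pyRange (i + 1) n).map (g i) from
      funext fun ps => funext fun i => PySem.List.foldl_append_singleton_eq_map _ _ _,
    PySem.List.foldl_append_eq_flatMap]
  rfl

theorem flatten_map_flatMap (r : List Int) (g : Int → List Int) (h : Int → Int → String) :
    (List.map String.toList (r.flatMap (fun i => (g i).map (h i)))).flatten
      = r.flatMap (fun i => (g i).flatMap (fun j => (h i j).toList)) := by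
  induction r with
  | nil => rfl
  | cons a r ih =>
    simp only [List.flatMap_cons, List.map_append, List.flatten_append, ih, List.map_map]
    rfl

theorem flatMap_entry_flatMap (r : List Int) (g : Int → List Int) (p : Int → Int → Char × Char)
    (e : Char × Char → List Char) :
    (r.flatMap (fun i => (g i).map (p i))).flatMap e
      = r.flatMap (fun i => (g i).flatMap (fun j => e (p i j))) := by
  induction r with
  | nil => rfl
  | cons a r ih =>
    simp only [List.flatMap_cons, List.flatMap_append, ih, List.flatMap_map]

theorem make_swap_layouts_spec : Claim_equal_make_swap_layouts := by
  unfold Claim_equal_make_swap_layouts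
  intro bn bl _ _
  unfold Spec_make_swap_layouts
  apply String.toList_inj.mp
  have hA : (make_swap_layouts bn bl).toList
      = "".toList ++ (outPairs symbolsA symbolsA []).flatMap (entryL bn.toList
          ((PySem.List.pyGet? ((PySem.Str.split? bl "\n").getD []) 1).getD "" ++ "\n"
            ++ (PySem.List.pyGet? ((PySem.Str.split? bl "\n").getD []) 2).getD "" ++ "\n"
            ++ (PySem.List.pyGet? ((PySem.Str.split? bl "\n").getD []) 3).getD "").toList) :=
    (outerA_spec bn _ symbolsA "" []).1
  rw [hA, pairsA_eq_tri]
  simp only [make_swap_layouts_alt]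
  rw [foldl_parts, PySem.Str.toList_join, String.toList_empty, join_nil_flatten,
    flatten_map_flatMap, List.nil_append,
    show tri symbolsA = tri (symbolsB.drop 0) from rfl,
    ← tri_eq_ranges symbolsB symbolsB.length 0 (by omega),
    flatMap_entry_flatMap]
  refine congrArg (fun f => List.flatMap f (PySem.List.pyRange 0 (symbolsB.length : Int)))
    (funext fun i => ?_)
  refine congrArg (fun f => List.flatMap f (PySem.List.pyRange (i + 1) (symbolsB.length : Int)))
    (funext fun j => ?_)
  exact (entryStrB_toList bn _ _ _).symm
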